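-- pv_equiv track=rewrite | github.com/2025-II-Infra-ADAII/proyecto-i-ada-ii-grupo-o | src/fuerzaBruta.py | calcular_costo
-- ===== SOURCE A (Python) =====
-- def calcular_costo(finca, perm):
--     tiempo_inicio = 0
--     costo_total = 0
--
--     for i in perm:
--         ts, tr, p = finca[i]
--         fin_riego = tiempo_inicio + tr
--         retraso = max(0, fin_riego - ts)
--         costo_total += p * retraso
--         tiempo_inicio = fin_riego
--
--     return costo_total
-- ===== SOURCE B (Python) =====
-- def calcular_costo(finca, perm):
--     # Reverse sweep: precompute the total watering time, then walk the
--     # permutation back-to-front, charging each plot against the remaining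
--     # end time and peeling its tr off as we move left.
--     restante = sum(finca[i][1] for i in perm)
--     costo = 0
--     for i in reversed(perm):
--         ts, tr, p = finca[i]
--         costo += p * max(0, restante - ts)
--         restante -= tr
--     return costo
-- ===== Notes on version B (the rewrite author's own statement) =====
-- stated objective: alternative
-- what changed: B precomputes the total watering time in a first pass and then traverses the permutation back-to-front, subtracting each plot's tr from the remaining end time, instead of A's forward pass that accumulates prefix end times.
import Mathlib
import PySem

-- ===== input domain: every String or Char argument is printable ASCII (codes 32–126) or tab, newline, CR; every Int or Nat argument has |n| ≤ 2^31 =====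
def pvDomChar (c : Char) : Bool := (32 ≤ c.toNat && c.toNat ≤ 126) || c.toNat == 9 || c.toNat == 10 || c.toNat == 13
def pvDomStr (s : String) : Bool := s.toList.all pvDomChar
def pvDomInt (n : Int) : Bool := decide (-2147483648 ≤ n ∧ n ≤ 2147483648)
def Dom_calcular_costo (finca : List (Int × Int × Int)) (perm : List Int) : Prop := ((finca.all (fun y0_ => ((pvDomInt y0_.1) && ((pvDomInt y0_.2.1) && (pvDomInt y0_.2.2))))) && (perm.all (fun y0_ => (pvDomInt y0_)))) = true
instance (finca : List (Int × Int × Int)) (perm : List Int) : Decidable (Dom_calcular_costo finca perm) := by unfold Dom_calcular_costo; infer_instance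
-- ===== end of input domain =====

-- ===== PORT A =====
-- B replaces A's forward prefix-sum pass by a precomputed total plus a reverse sweep; not faster.
def calcular_costo (finca : List (Int × Int × Int)) (perm : List Int) : Int :=
  (perm.foldl (fun (st : Int × Int) i =>
      let trip := PySem.List.pyGetD finca i (0, 0, 0)  -- finca[i]; Pre_ guarantees in range
      let fin_riego := st.1 + trip.2.1
      let retraso := max 0 (fin_riego - trip.1)
      (fin_riego, st.2 + trip.2.2 * retraso)) (0, 0)).2

-- ===== PORT B =====
def calcular_costo_alt (finca : List (Int × Int × Int)) (perm : List Int) : Int :=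
  let restante := (perm.map (fun i => (PySem.List.pyGetD finca i (0, 0, 0)).2.1)).sum
  (perm.reverse.foldl (fun (st : Int × Int) i =>
      let trip := PySem.List.pyGetD finca i (0, 0, 0)
      (st.1 - trip.2.1, st.2 + trip.2.2 * max 0 (st.1 - trip.1))) (restante, 0)).2

-- ===== PRECONDITION & SPEC =====
-- Pre_ excludes exactly the inputs where finca[i] raises IndexError (in both programs).
def Pre_calcular_costo (finca : List (Int × Int × Int)) (perm : List Int) : Prop :=
  ∀ i ∈ perm, PySem.Raise.InRange finca.length i
instance (finca : List (Int × Int × Int)) (perm : List Int) : Decidable (Pre_calcular_costo finca perm) := by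
  unfold Pre_calcular_costo; infer_instance
def pvWitness_calcular_costo : (List (Int × Int × Int)) × List Int := ([(1, 2, 3), (0, 1, 2)], [1, 0])

def Spec_calcular_costo (finca : List (Int × Int × Int)) (perm : List Int) (out : Int) : Prop := out = calcular_costo_alt finca perm
instance (finca : List (Int × Int × Int)) (perm : List Int) (out : Int) : Decidable (Spec_calcular_costo finca perm out) := by unfold Spec_calcular_costo; infer_instance

-- ===== CLAIM =====
def Claim_equal_calcular_costo : Prop := ∀ (finca : List (Int × Int × Int)) (perm : List Int), Dom_calcular_costo finca perm → Pre_calcular_costo finca perm → Spec_calcular_costo finca perm (calcular_costo finca perm)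

-- ===== LEMMAS AND PROOFS =====
-- common specification: cost of watering the plots in order starting at time t
def pvCost (t : Int) : List (Int × Int × Int) → Int
  | [] => 0
  | x :: xs => x.2.2 * max 0 (t + x.2.1 - x.1) + pvCost (t + x.2.1) xs

def pvTr (l : List (Int × Int × Int)) : Int := (l.map (fun x => x.2.1)).sum

-- A's forward fold computes (t + total tr, c + pvCost t l)
theorem pvAfold (l : List (Int × Int × Int)) (t c : Int) :
    l.foldl (fun (st : Int × Int) x =>
      (st.1 + x.2.1, st.2 + x.2.2 * max 0 (st.1 + x.2.1 - x.1))) (t, c)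
    = (t + pvTr l, c + pvCost t l) := by
  induction l generalizing t c with
  | nil => simp [pvTr, pvCost]
  | cons x xs ih => simp [pvTr, pvCost, List.foldl, ih]; constructor <;> ring

-- B's reverse sweep, seen as a foldr starting from the total, computes the same cost
theorem pvBfold (l : List (Int × Int × Int)) (t c : Int) :
    l.foldr (fun x (st : Int × Int) =>
      (st.1 - x.2.1, st.2 + x.2.2 * max 0 (st.1 - x.1))) (t + pvTr l, c)
    = (t, c + pvCost t l) := by
  induction l generalizing t c with
  | nil => simp [pvTr, pvCost]
  | cons x xs ih =>
    have h : t + pvTr (x :: xs) = (t + x.2.1) + pvTr xs := by simp [pvTr]; ring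
    simp only [List.foldr, h, ih]
    simp [pvCost]; ring

theorem pvMain (f : Int → Int × Int × Int) (perm : List Int) :
    (perm.foldl (fun (st : Int × Int) i =>
      (st.1 + (f i).2.1, st.2 + (f i).2.2 * max 0 (st.1 + (f i).2.1 - (f i).1))) (0, 0)).2
    = (perm.reverse.foldl (fun (st : Int × Int) i =>
      (st.1 - (f i).2.1, st.2 + (f i).2.2 * max 0 (st.1 - (f i).1)))
        ((perm.map (fun i => (f i).2.1)).sum, 0)).2 := by
  have hA : perm.foldl (fun (st : Int × Int) i =>
      (st.1 + (f i).2.1, st.2 + (f i).2.2 * max 0 (st.1 + (f i).2.1 - (f i).1))) (0, 0)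
      = (perm.map f).foldl (fun (st : Int × Int) x =>
      (st.1 + x.2.1, st.2 + x.2.2 * max 0 (st.1 + x.2.1 - x.1))) (0, 0) :=
    (List.foldl_map (f := f)
      (g := fun (st : Int × Int) x => (st.1 + x.2.1, st.2 + x.2.2 * max 0 (st.1 + x.2.1 - x.1)))
      (l := perm) (init := ((0 : Int), (0 : Int)))).symm
  have hB : perm.reverse.foldl (fun (st : Int × Int) i =>
      (st.1 - (f i).2.1, st.2 + (f i).2.2 * max 0 (st.1 - (f i).1)))
        ((perm.map (fun i => (f i).2.1)).sum, 0)
      = (perm.map f).foldr (fun x (st : Int × Int) =>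
      (st.1 - x.2.1, st.2 + x.2.2 * max 0 (st.1 - x.1))) ((perm.map (fun i => (f i).2.1)).sum, 0) := by
    rw [← List.foldl_map (f := f)
        (g := fun (st : Int × Int) x => (st.1 - x.2.1, st.2 + x.2.2 * max 0 (st.1 - x.1))),
      List.map_reverse, List.foldl_reverse]
  have hsum : (perm.map (fun i => (f i).2.1)).sum = 0 + pvTr (perm.map f) := by
    simp [pvTr, List.map_map, Function.comp_def]
  rw [hA, hB, hsum, pvAfold, pvBfold]

-- ===== VERDICT =====
theorem calcular_costo_spec : Claim_equal_calcular_costo := by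
  intro finca perm _ _
  unfold Spec_calcular_costo calcular_costo calcular_costo_alt
  exact pvMain (fun i => PySem.List.pyGetD finca i (0, 0, 0)) perm
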